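-- pv_equiv track=rewrite | github.com/GDjkhp/NoobGPT | sflix.py | key_extraction
-- ===== SOURCE A (Python) =====
-- def key_extraction(string, table):
--     sources_array = list(string)
--     extracted_key = ""
--     current_index = 0
--     for index in table:
--         start = index[0] + current_index
--         end = start + index[1]
--         for i in range(start, end):
--             extracted_key += sources_array[i]
--             sources_array[i] = ' '
--         current_index += index[1]
--     return extracted_key, ''.join(sources_array)
-- ===== SOURCE B (Python) =====
-- def key_extraction(string, table):
--     # Stage 1: resolve the (offset, length) deltas into absolute spans.
--     spans = []
--     shift = 0
--     for off, length in table: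
--         spans.append((off + shift, length))
--         shift += length
--
--     # Stage 2: consume each span from the char cells, recursively per cell.
--     chars = list(string)
--
--     def take(start, length):
--         if length <= 0:
--             return ''
--         c = chars[start]
--         chars[start] = ' '
--         return c + take(start + 1, length - 1)
--
--     return ''.join(take(s, l) for s, l in spans), ''.join(chars)
-- ===== Notes on version B (the rewrite author's own statement) =====
-- stated objective: alternative
-- what changed: B splits A's single stateful loop into two stages — a prefix-sum pass that resolves the table into absolute spans, then a recursive per-cell consumer that returns each span's segment while blanking its cells — and assembles the key by joining segment strings instead of A's running char-by-char concatenation onto one key string.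
import Mathlib
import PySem

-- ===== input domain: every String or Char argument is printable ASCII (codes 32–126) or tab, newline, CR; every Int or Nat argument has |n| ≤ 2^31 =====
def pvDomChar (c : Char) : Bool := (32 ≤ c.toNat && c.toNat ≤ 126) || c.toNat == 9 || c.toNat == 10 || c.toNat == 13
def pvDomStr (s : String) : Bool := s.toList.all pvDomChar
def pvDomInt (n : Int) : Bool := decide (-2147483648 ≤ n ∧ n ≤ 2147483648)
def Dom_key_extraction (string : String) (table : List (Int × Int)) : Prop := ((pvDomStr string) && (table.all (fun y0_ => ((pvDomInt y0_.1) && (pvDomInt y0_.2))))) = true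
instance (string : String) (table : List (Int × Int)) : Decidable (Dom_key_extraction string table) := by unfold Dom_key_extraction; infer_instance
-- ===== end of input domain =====

-- B restructures A's single interleaved loop into a prefix-sum span pass plus a recursive
-- per-cell consumer with joined segment parts (no char-by-char string concatenation).

-- ===== PORT A =====
-- inner loop body: extracted_key += sources_array[i]; sources_array[i] = ' '
def charStepA (p : List Char × List Char) (i : Int) : List Char × List Char :=
  (p.1 ++ [PySem.List.pyGetD p.2 i ' '], PySem.List.pySetD p.2 i ' ')

-- outer loop body over table entries (state: extracted_key, sources_array, current_index)
def keyExtractStepA (st : List Char × List Char × Int) (index : Int × Int) : List Char × List Char × Int :=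
  let start := index.1 + st.2.2
  let stop := start + index.2
  let inner := (PySem.List.pyRange start stop 1).foldl charStepA (st.1, st.2.1)
  (inner.1, inner.2, st.2.2 + index.2)

def key_extraction (string : String) (table : List (Int × Int)) : String × String :=
  let r := table.foldl keyExtractStepA ([], string.toList, 0)
  (String.ofList r.1, String.ofList r.2.1)

-- ===== PORT B =====
-- stage 1 loop body: spans.append((off + shift, length)); shift += length
def spanStepB (st : List (Int × Int) × Int) (od : Int × Int) : List (Int × Int) × Int :=
  (st.1 ++ [(od.1 + st.2, od.2)], st.2 + od.2)

-- def take(start, length): recursive per-cell consumer; the mutated closure variable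
-- `chars` is threaded explicitly, so take returns (segment, chars after blanking)
def takeB (chars : List Char) (start length : Int) : List Char × List Char :=
  if length ≤ 0 then ([], chars)
  else
    let c := PySem.List.pyGetD chars start ' '
    let chars' := PySem.List.pySetD chars start ' '
    let r := takeB chars' (start + 1) (length - 1)
    (c :: r.1, r.2)
termination_by length.toNat
decreasing_by simp_wf; omega

-- ''.join(take(s, l) for s, l in spans): sequential consumption, parts collected
def consumeStepB (st : List (List Char) × List Char) (sl : Int × Int) : List (List Char) × List Char :=
  let r := takeB st.2 sl.1 sl.2
  (st.1 ++ [r.1], r.2)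

def key_extraction_alt (string : String) (table : List (Int × Int)) : String × String :=
  let spans := (table.foldl spanStepB ([], 0)).1
  let st := spans.foldl consumeStepB ([], string.toList)
  (String.ofList st.1.flatten, String.ofList st.2)

-- ===== PRECONDITION & SPEC =====
-- Pre_ excludes exactly the inputs on which the Python A raises IndexError (some accessed
-- index i = offset + sum of previous lengths falls outside [-len(string), len(string)));
-- B raises IndexError on the same inputs.
def Pre_key_extraction (string : String) (table : List (Int × Int)) : Prop :=
  ∀ k, (h : k < table.length) → 0 < (table[k]).2 →
    -(string.toList.length : Int) ≤ (table[k]).1 + (((table.take k).map Prod.snd).sum) ∧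
    (table[k]).1 + (((table.take k).map Prod.snd).sum) + (table[k]).2 ≤ (string.toList.length : Int)

instance (string : String) (table : List (Int × Int)) : Decidable (Pre_key_extraction string table) := by
  unfold Pre_key_extraction; infer_instance

def pvWitness_key_extraction : String × (List (Int × Int)) := ("abcdef", [(1, 2), (0, 2)])

def Spec_key_extraction (string : String) (table : List (Int × Int)) (out : String × String) : Prop :=
  out = key_extraction_alt string table
instance (string : String) (table : List (Int × Int)) (out : String × String) : Decidable (Spec_key_extraction string table out) := by
  unfold Spec_key_extraction; infer_instance

-- ===== CLAIM (what is proved, stated in full; the proofs are below) =====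
def Claim_equal_key_extraction : Prop := ∀ (string : String) (table : List (Int × Int)), Dom_key_extraction string table → Pre_key_extraction string table → Spec_key_extraction string table (key_extraction string table)

-- ===== LEMMAS AND PROOFS =====

-- absolute spans of a table suffix, given the accumulated shift
def spansOf : List (Int × Int) → Int → List (Int × Int)
  | [], _ => []
  | (o, l) :: r, sh => (o + sh, l) :: spansOf r (sh + l)

lemma spanFold :
    ∀ (t : List (Int × Int)) (acc : List (Int × Int)) (sh : Int),
    t.foldl spanStepB (acc, sh) = (acc ++ spansOf t sh, sh + (t.map Prod.snd).sum) := by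
  intro t
  induction t with
  | nil => intro acc sh; simp [spansOf]
  | cons hd r ih =>
    intro acc sh
    obtain ⟨o, l⟩ := hd
    rw [List.foldl_cons]
    simp only [spanStepB]
    rw [ih]
    simp only [spansOf, Prod.mk.injEq]
    exact ⟨by simp, by simp [add_assoc]⟩

-- A's inner char loop is B's recursive take (for a nonnegative length)
lemma innerA_take (m : Nat) :
    ∀ (chars : List Char) (start : Int) (ext : List Char),
    (PySem.List.pyRange start (start + (m : Int)) 1).foldl charStepA (ext, chars) =
      (ext ++ (takeB chars start (m : Int)).1, (takeB chars start (m : Int)).2) := by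
  induction m with
  | zero =>
    intro chars start ext
    rw [show start + ((0 : Nat) : Int) = start by omega,
        PySem.List.pyRange_one_eq_nil (le_refl start), takeB]
    simp
  | succ m ih =>
    intro chars start ext
    have hcons : PySem.List.pyRange start (start + ((m + 1 : Nat) : Int)) 1 =
        start :: PySem.List.pyRange (start + 1) (start + ((m + 1 : Nat) : Int)) 1 :=
      PySem.List.pyRange_one_cons (by omega)
    rw [hcons, List.foldl_cons]
    have hstep : charStepA (ext, chars) start =
        (ext ++ [PySem.List.pyGetD chars start ' '], PySem.List.pySetD chars start ' ') := rfl
    rw [hstep]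
    have ih' := ih (PySem.List.pySetD chars start ' ') (start + 1)
      (ext ++ [PySem.List.pyGetD chars start ' '])
    rw [show start + 1 + ((m : Nat) : Int) = start + ((m + 1 : Nat) : Int) by push_cast; ring] at ih'
    rw [ih']
    rw [show takeB chars start ((m + 1 : Nat) : Int) =
        (PySem.List.pyGetD chars start ' ' ::
          (takeB (PySem.List.pySetD chars start ' ') (start + 1) (((m + 1 : Nat) : Int) - 1)).1,
         (takeB (PySem.List.pySetD chars start ' ') (start + 1) (((m + 1 : Nat) : Int) - 1)).2)
      from by rw [takeB]; simp only [if_neg (by omega : ¬ ((m + 1 : Nat) : Int) ≤ 0)]]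
    rw [show ((m + 1 : Nat) : Int) - 1 = ((m : Nat) : Int) by push_cast; ring]
    simp [List.append_assoc]

-- A's outer loop is stage 2 of B over the spans of the remaining table
lemma outerA_consume :
    ∀ (t : List (Int × Int)) (chars ext : List Char) (cur : Int),
    t.foldl keyExtractStepA (ext, chars, cur) =
      (ext ++ ((spansOf t cur).foldl consumeStepB ([], chars)).1.flatten,
        ((spansOf t cur).foldl consumeStepB ([], chars)).2,
        cur + (t.map Prod.snd).sum) := by
  have consume_shift : ∀ (sp : List (Int × Int)) (parts : List (List Char)) (chars : List Char),
      sp.foldl consumeStepB (parts, chars) =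
        (parts ++ (sp.foldl consumeStepB ([], chars)).1, (sp.foldl consumeStepB ([], chars)).2) := by
    intro sp
    induction sp with
    | nil => intro parts chars; simp
    | cons hd r ih =>
      intro parts chars
      rw [List.foldl_cons, List.foldl_cons]
      simp only [consumeStepB]
      rw [ih (parts ++ [(takeB chars hd.1 hd.2).1]), ih ([] ++ [(takeB chars hd.1 hd.2).1])]
      simp
  intro t
  induction t with
  | nil => intro chars ext cur; simp [spansOf]
  | cons hd rest ih =>
    intro chars ext cur
    obtain ⟨off, len⟩ := hd
    rw [List.foldl_cons]
    simp only [keyExtractStepA, spansOf, List.foldl_cons, consumeStepB]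
    by_cases hpos : 0 < len
    · have hin := innerA_take len.toNat chars (off + cur) ext
      rw [show off + cur + ((len.toNat : Nat) : Int) = off + cur + len by omega] at hin
      rw [show ((len.toNat : Nat) : Int) = len by omega] at hin
      rw [hin, ih]
      rw [consume_shift (spansOf rest (cur + len)) ([] ++ [(takeB chars (off + cur) len).1])]
      simp [List.append_assoc, add_assoc]
    · have hnil : PySem.List.pyRange (off + cur) (off + cur + len) 1 = [] :=
        PySem.List.pyRange_one_eq_nil (by omega)
      have htake : takeB chars (off + cur) len = ([], chars) := by
        rw [takeB]; simp only [if_pos (by omega : len ≤ 0)]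
      rw [hnil]
      simp only [List.foldl_nil]
      rw [ih, htake]
      rw [consume_shift (spansOf rest (cur + len)) ([] ++ [([] : List Char)])]
      simp [add_assoc]

-- ===== VERDICT (by name: the statement is the Claim_ definition above) =====
theorem key_extraction_spec : Claim_equal_key_extraction := by
  intro string table _hdom _hpre
  unfold Spec_key_extraction key_extraction key_extraction_alt
  rw [outerA_consume table string.toList [] 0]
  have hs := spanFold table [] 0
  simp only [List.nil_append] at hs
  rw [hs]
  simp
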